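-- pv_equiv track=rewrite | github.com/nkc-137/agentVillage-assignment | app/services/scheduler_service.py | _build_status_options
-- ===== SOURCE A (Python) =====
-- from typing import Any
--
-- def _build_status_options(agent: dict[str, Any]) -> list[str]:
--     """Generate context-appropriate status options based on agent personality."""
--     name = agent.get("name", "Agent")
--     bio = agent.get("bio", "")
--
--     # Generic statuses any agent might have
--     generic = [
--         "Taking a quiet moment",
--         "Watching the village from the window",
--         "Rearranging the room",
--         "Lost in thought",
--         "Humming softly",
--     ]
--
--     # Personality-flavored statuses based on bio keywords
--     personality_statuses: list[str] = []
--     bio_lower = bio.lower()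
--     if any(w in bio_lower for w in ["star", "moon", "sky", "night"]):
--         personality_statuses = [
--             "Mapping a new constellation",
--             "Polishing the telescope lens",
--             "Counting shooting stars",
--             "Gazing at the horizon",
--         ]
--     elif any(w in bio_lower for w in ["tinker", "build", "gadget", "engineer"]):
--         personality_statuses = [
--             "Debugging a new contraption",
--             "Soldering something suspicious",
--             "Testing the latest invention",
--             "Sketching blueprints",
--         ]
--     elif any(w in bio_lower for w in ["garden", "philos", "quiet", "meditat"]):
--         personality_statuses = [
--             "Watering the thought garden",
--             "Meditating by the window",
--             "Pruning old ideas",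
--             "Reading in silence",
--         ]
--
--     return personality_statuses or generic
-- ===== SOURCE B (Python) =====
-- def _build_status_options(agent):
--     """Generate context-appropriate status options based on agent personality."""
--     bio = agent.get("bio", "")
--
--     generic = [
--         "Taking a quiet moment",
--         "Watching the village from the window",
--         "Rearranging the room",
--         "Lost in thought",
--         "Humming softly",
--     ]
--
--     tables = [
--         [
--             "Mapping a new constellation",
--             "Polishing the telescope lens",
--             "Counting shooting stars",
--             "Gazing at the horizon",
--         ],
--         [
--             "Debugging a new contraption",
--             "Soldering something suspicious",
--             "Testing the latest invention",
--             "Sketching blueprints",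
--         ],
--         [
--             "Watering the thought garden",
--             "Meditating by the window",
--             "Pruning old ideas",
--             "Reading in silence",
--         ],
--     ]
--
--     keyword_group = {
--         "star": 0, "moon": 0, "sky": 0, "night": 0,
--         "tinker": 1, "build": 1, "gadget": 1, "engineer": 1,
--         "garden": 2, "philos": 2, "quiet": 2, "meditat": 2,
--     }
--
--     # Single left-to-right scan of the bio: at each position, record the
--     # highest-priority (lowest-index) group whose keyword starts there.
--     b = bio.lower()
--     best = len(tables)  # sentinel: no match yet
--     for i in range(len(b)):
--         for kw, g in keyword_group.items():
--             if g < best and b.startswith(kw, i):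
--                 best = g
--     return tables[best] if best < len(tables) else generic
-- ===== Notes on version B (the rewrite author's own statement) =====
-- stated objective: alternative
-- what changed: Replaces the if/elif cascade of per-keyword substring-membership tests with a single positional scan of the bio: at each index it checks via startswith(kw, i) against a keyword-to-group map and keeps the minimum (highest-priority) matching group index, selecting the status table by that index at the end.
import Mathlib
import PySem

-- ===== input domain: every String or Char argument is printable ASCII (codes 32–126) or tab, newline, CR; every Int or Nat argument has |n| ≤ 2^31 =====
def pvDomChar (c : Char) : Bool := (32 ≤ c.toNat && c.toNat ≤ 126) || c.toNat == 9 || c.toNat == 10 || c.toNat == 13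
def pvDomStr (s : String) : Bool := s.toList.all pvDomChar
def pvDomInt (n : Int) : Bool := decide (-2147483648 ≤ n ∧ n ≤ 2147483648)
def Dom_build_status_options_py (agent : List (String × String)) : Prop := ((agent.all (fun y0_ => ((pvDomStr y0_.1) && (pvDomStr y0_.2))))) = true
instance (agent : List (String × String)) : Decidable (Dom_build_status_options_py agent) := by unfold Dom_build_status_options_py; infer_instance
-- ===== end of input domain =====

-- B replaces A's if/elif cascade of substring tests by one positional scan of the bio that
-- tracks the minimum matching keyword-group index; objective: alternative algorithm, same cost.

-- ===== PORT A =====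
def build_status_options_py (agent : List (String × String)) : List String :=
  let _name := PySem.Dict.getD (PySem.Dict.mk agent) "name" "Agent"
  let bio := PySem.Dict.getD (PySem.Dict.mk agent) "bio" ""
  let generic := ["Taking a quiet moment", "Watching the village from the window",
    "Rearranging the room", "Lost in thought", "Humming softly"]
  let bio_lower := PySem.Str.lower bio
  let personality_statuses : List String :=
    if ["star", "moon", "sky", "night"].any (fun w => PySem.Str.isIn w bio_lower) then
      ["Mapping a new constellation", "Polishing the telescope lens",
       "Counting shooting stars", "Gazing at the horizon"]
    else if ["tinker", "build", "gadget", "engineer"].any (fun w => PySem.Str.isIn w bio_lower) then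
      ["Debugging a new contraption", "Soldering something suspicious",
       "Testing the latest invention", "Sketching blueprints"]
    else if ["garden", "philos", "quiet", "meditat"].any (fun w => PySem.Str.isIn w bio_lower) then
      ["Watering the thought garden", "Meditating by the window",
       "Pruning old ideas", "Reading in silence"]
    else []
  -- 'personality_statuses or generic': an empty list is falsy
  if personality_statuses.isEmpty then generic else personality_statuses

-- ===== PORT B =====
-- B's tables list (priority order) and keyword→group dict (items in insertion order)
def pvTables : List (List String) :=
  [["Mapping a new constellation", "Polishing the telescope lens",
    "Counting shooting stars", "Gazing at the horizon"],
   ["Debugging a new contraption", "Soldering something suspicious",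
    "Testing the latest invention", "Sketching blueprints"],
   ["Watering the thought garden", "Meditating by the window",
    "Pruning old ideas", "Reading in silence"]]

def pvKwGroups : List (List Char × Nat) :=
  [("star".toList, 0), ("moon".toList, 0), ("sky".toList, 0), ("night".toList, 0),
   ("tinker".toList, 1), ("build".toList, 1), ("gadget".toList, 1), ("engineer".toList, 1),
   ("garden".toList, 2), ("philos".toList, 2), ("quiet".toList, 2), ("meditat".toList, 2)]

-- the nested for-loops: for i in range(len(b)): for kw, g in keyword_group.items(): …
-- range(len(b)) is List.range; b.startswith(kw, i) with 0 ≤ i < len(b) is exactly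
-- Chars.startswith on (b.drop i) (hand-ported, exact on that index range)
def pvBest (b : List Char) : Nat :=
  (List.range b.length).foldl
    (fun best i =>
      pvKwGroups.foldl
        (fun best p => if p.2 < best && PySem.Chars.startswith (b.drop i) p.1 then p.2 else best)
        best)
    3

def build_status_options_py_alt (agent : List (String × String)) : List String :=
  let bio := PySem.Dict.getD (PySem.Dict.mk agent) "bio" ""
  let generic := ["Taking a quiet moment", "Watching the village from the window",
    "Rearranging the room", "Lost in thought", "Humming softly"]
  let b := (PySem.Str.lower bio).toList
  let best := pvBest b
  if best < pvTables.length then pvTables.getD best generic else generic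

-- ===== PRECONDITION & SPEC =====
def Spec_build_status_options_py (agent : List (String × String)) (out : List String) : Prop := out = build_status_options_py_alt agent
instance (agent : List (String × String)) (out : List String) : Decidable (Spec_build_status_options_py agent out) := by unfold Spec_build_status_options_py; infer_instance

-- ===== CLAIM (what is proved, stated in full; the proofs are below) =====
def Claim_equal_build_status_options_py : Prop := ∀ (agent : List (String × String)), Dom_build_status_options_py agent → Spec_build_status_options_py agent (build_status_options_py agent)

-- ===== LEMMAS AND PROOFS =====

-- keyword groups as plain lists
def pvKw0 : List (List Char) := ["star".toList, "moon".toList, "sky".toList, "night".toList]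
def pvKw1 : List (List Char) := ["tinker".toList, "build".toList, "gadget".toList, "engineer".toList]
def pvKw2 : List (List Char) := ["garden".toList, "philos".toList, "quiet".toList, "meditat".toList]

-- does some keyword of the group start at position i of b?
def pvSwg (b : List Char) (i : Nat) (kws : List (List Char)) : Bool :=
  kws.any (fun kw => PySem.Chars.startswith (b.drop i) kw)

-- smallest group matching at position i (3 = none)
def pvGAt (b : List Char) (i : Nat) : Nat :=
  if pvSwg b i pvKw0 then 0 else if pvSwg b i pvKw1 then 1 else if pvSwg b i pvKw2 then 2 else 3

lemma pv_seg_fold (b : List Char) (i : Nat) (kws : List (List Char)) (g best : Nat) :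
    ((kws.map (fun kw => (kw, g))).foldl
      (fun best p => if p.2 < best && PySem.Chars.startswith (b.drop i) p.1 then p.2 else best)
      best)
    = if g < best && pvSwg b i kws then g else best := by
  induction kws generalizing best with
  | nil => simp [pvSwg]
  | cons kw kws ih =>
    have hcons : pvSwg b i (kw :: kws)
        = (PySem.Chars.startswith (b.drop i) kw || pvSwg b i kws) := by simp [pvSwg]
    simp only [List.map_cons, List.foldl_cons]
    cases hsw : PySem.Chars.startswith (b.drop i) kw with
    | false =>
      rw [if_neg (by simp), ih, hcons, hsw, Bool.false_or]
    | true =>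
      by_cases hg : g < best
      · rw [if_pos (by simp [hg]), ih, if_neg (by simp),
            if_pos (by simp [hcons, hsw, hg])]
      · rw [if_neg (by simp [hg]), ih, if_neg (by simp [hg]), if_neg (by simp [hg])]

lemma pv_inner_fold (b : List Char) (i : Nat) (best : Nat) (hbest : best ≤ 3) :
    (pvKwGroups.foldl
      (fun best p => if p.2 < best && PySem.Chars.startswith (b.drop i) p.1 then p.2 else best)
      best)
    = min best (pvGAt b i) := by
  have hsplit : pvKwGroups
      = (pvKw0.map (fun kw => (kw, 0))) ++ (pvKw1.map (fun kw => (kw, 1)))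
        ++ (pvKw2.map (fun kw => (kw, 2))) := by rfl
  rw [hsplit, List.foldl_append, List.foldl_append,
      pv_seg_fold, pv_seg_fold, pv_seg_fold, pvGAt]
  by_cases h0 : pvSwg b i pvKw0 <;> by_cases h1 : pvSwg b i pvKw1 <;>
    by_cases h2 : pvSwg b i pvKw2 <;> simp [h0, h1, h2] <;> first | (split_ifs <;> omega) | omega

-- the outer loop computes the min of pvGAt over positions, i.e. A's first-match chain
lemma pv_outer_fold (b : List Char) (n : Nat) :
    ((List.range n).foldl
      (fun best i =>
        pvKwGroups.foldl
          (fun best p => if p.2 < best && PySem.Chars.startswith (b.drop i) p.1 then p.2 else best)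
          best)
      3)
    = (if (List.range n).any (fun i => pvSwg b i pvKw0) then 0
       else if (List.range n).any (fun i => pvSwg b i pvKw1) then 1
       else if (List.range n).any (fun i => pvSwg b i pvKw2) then 2 else 3) := by
  induction n with
  | zero => simp
  | succ n ih =>
    rw [List.range_succ, List.foldl_append]
    simp only [List.foldl_cons, List.foldl_nil]
    rw [ih, pv_inner_fold b n _ (by split_ifs <;> omega)]
    simp only [List.any_append, List.any_cons, List.any_nil, Bool.or_false]
    unfold pvGAt
    by_cases a0 : (List.range n).any (fun i => pvSwg b i pvKw0) <;>
      by_cases a1 : (List.range n).any (fun i => pvSwg b i pvKw1) <;>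
      by_cases a2 : (List.range n).any (fun i => pvSwg b i pvKw2) <;>
      by_cases h0 : pvSwg b n pvKw0 <;> by_cases h1 : pvSwg b n pvKw1 <;>
      by_cases h2 : pvSwg b n pvKw2 <;>
      simp [a0, a1, a2, h0, h1, h2]

-- 'kw in cs' equals 'some position of cs starts with kw', for nonempty kw
lemma pv_isIn_eq_any_startswith (cs kw : List Char) (hkw : kw ≠ []) :
    PySem.Chars.isIn kw cs
    = (List.range cs.length).any (fun i => PySem.Chars.startswith (cs.drop i) kw) := by
  by_cases h : PySem.Chars.isIn kw cs = true
  · rw [h]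
    obtain ⟨j, hj⟩ := (PySem.Chars.exists_prefix_drop_iff_isIn kw cs).mpr h
    have hjlt : j < cs.length := by
      by_contra hge
      rw [List.drop_eq_nil_of_le (by omega)] at hj
      exact hkw (List.prefix_nil.mp hj)
    symm
    simp only [List.any_eq_true, List.mem_range]
    exact ⟨j, hjlt, by rw [PySem.Chars.startswith_iff]; exact hj⟩
  · rw [Bool.eq_false_iff.mpr h]
    symm
    rw [Bool.eq_false_iff]
    intro hx
    simp only [List.any_eq_true, List.mem_range] at hx
    obtain ⟨i, _, hsw⟩ := hx
    exact h ((PySem.Chars.exists_prefix_drop_iff_isIn kw cs).mp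
      ⟨i, (PySem.Chars.startswith_iff _ _).mp hsw⟩)

-- swap the two 'any's: some position matches some group keyword ↔ some keyword is in cs
lemma pv_any_group (cs : List Char) (kws : List (List Char)) (hkw : ∀ kw ∈ kws, kw ≠ []) :
    ((List.range cs.length).any (fun i => pvSwg cs i kws))
    = kws.any (fun kw => PySem.Chars.isIn kw cs) := by
  rw [Bool.eq_iff_iff]
  simp only [pvSwg, List.any_eq_true, List.mem_range]
  constructor
  · rintro ⟨i, hi, kw, hmem, hsw⟩
    refine ⟨kw, hmem, ?_⟩
    rw [pv_isIn_eq_any_startswith cs kw (hkw kw hmem)]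
    simp only [List.any_eq_true, List.mem_range]
    exact ⟨i, hi, hsw⟩
  · rintro ⟨kw, hmem, hin⟩
    rw [pv_isIn_eq_any_startswith cs kw (hkw kw hmem)] at hin
    simp only [List.any_eq_true, List.mem_range] at hin
    obtain ⟨i, hi, hsw⟩ := hin
    exact ⟨i, hi, kw, hmem, hsw⟩

-- pvBest characterized by A's three group conditions
lemma pv_best_char (cs : List Char) :
    pvBest cs
    = (if pvKw0.any (fun kw => PySem.Chars.isIn kw cs) then 0
       else if pvKw1.any (fun kw => PySem.Chars.isIn kw cs) then 1
       else if pvKw2.any (fun kw => PySem.Chars.isIn kw cs) then 2 else 3) := by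
  unfold pvBest
  rw [pv_outer_fold cs cs.length,
      pv_any_group cs pvKw0 (by decide), pv_any_group cs pvKw1 (by decide),
      pv_any_group cs pvKw2 (by decide)]

-- ===== VERDICT (by name: the statement is the Claim_ definition above) =====
theorem build_status_options_py_spec : Claim_equal_build_status_options_py := by
  intro agent _
  unfold Spec_build_status_options_py build_status_options_py build_status_options_py_alt
  set bio := PySem.Dict.getD (PySem.Dict.mk agent) "bio" "" with hbio
  have hb := pv_best_char (PySem.Str.lower bio).toList
  simp only [PySem.Str.isIn_eq] at *
  by_cases h0 : pvKw0.any (fun kw => PySem.Chars.isIn kw (PySem.Str.lower bio).toList) <;>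
    by_cases h1 : pvKw1.any (fun kw => PySem.Chars.isIn kw (PySem.Str.lower bio).toList) <;>
    by_cases h2 : pvKw2.any (fun kw => PySem.Chars.isIn kw (PySem.Str.lower bio).toList) <;>
    simp [pvKw0, pvKw1, pvKw2, pvTables] at * <;>
    simp_all
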